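-- pv_equiv track=rewrite | github.com/ctc316/algorithm-python | Lintcode/Ladder_all_G_OA/1086. Repeated String Match.py | search
-- ===== SOURCE A (Python) =====
-- def search(A, B, i):
--     repeats = 1
--     j = 0
--     len_A = len(A)
--     len_B = len(B)
--     while i < len_A and j < len_B and A[i] == B[j]:
--         i += 1
--         j += 1
--
--         if j == len_B:
--             return repeats
--
--         if i == len_A:
--             repeats += 1
--             i = 0
--
--     return -1
-- ===== SOURCE B (Python) =====
-- def search(A, B, i):
--     len_A = len(A)
--     len_B = len(B)
--     if len_B == 0 or i < 0 or i >= len_A: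
--         return -1
--     repeats = (i + len_B - 1) // len_A + 1
--     if (A * repeats)[i:i + len_B] == B:
--         return repeats
--     return -1
-- ===== Notes on version B (the rewrite author's own statement) =====
-- stated objective: simpler
-- what changed: B replaces A's manual wrap-around character-by-character loop by a closed-form count of needed copies ((i+len(B)-1)//len(A)+1) followed by a single slice comparison against the repeated string.
-- outside the precondition, e.g. on search('ab', 'bab', -1): A returns 1, B returns -1
import Mathlib
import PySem

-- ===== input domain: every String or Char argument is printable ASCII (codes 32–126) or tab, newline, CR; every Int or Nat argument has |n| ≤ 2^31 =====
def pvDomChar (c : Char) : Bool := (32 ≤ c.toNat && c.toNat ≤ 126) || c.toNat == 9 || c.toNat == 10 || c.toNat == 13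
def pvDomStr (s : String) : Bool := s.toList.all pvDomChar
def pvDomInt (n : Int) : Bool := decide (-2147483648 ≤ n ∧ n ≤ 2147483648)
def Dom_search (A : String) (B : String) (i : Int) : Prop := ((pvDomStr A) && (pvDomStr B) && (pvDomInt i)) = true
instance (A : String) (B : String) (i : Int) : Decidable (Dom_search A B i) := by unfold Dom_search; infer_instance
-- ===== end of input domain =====

-- B replaces A's wrap-around character loop by a closed-form copy count plus one slice comparison (objective: simpler).


-- ===== PORT A =====
-- A's while loop: state (repeats, i, j); it terminates because j strictly increases toward len_B
def searchLoop (As Bs : List Char) (lenA lenB repeats i j : Int) : Int :=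
  if h : i < lenA ∧ j < lenB ∧ PySem.List.pyGet? As i = PySem.List.pyGet? Bs j then
    -- i += 1; j += 1
    if j + 1 = lenB then repeats
    else if i + 1 = lenA then searchLoop As Bs lenA lenB (repeats + 1) 0 (j + 1)
    else searchLoop As Bs lenA lenB repeats (i + 1) (j + 1)
  else -1
termination_by (lenB - j).toNat
decreasing_by all_goals (have := h.2.1; omega)

def search (A : String) (B : String) (i : Int) : Int :=
  let lenA : Int := A.toList.length
  let lenB : Int := B.toList.length
  searchLoop A.toList B.toList lenA lenB 1 i 0

-- ===== PORT B =====
def search_alt (A : String) (B : String) (i : Int) : Int :=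
  let lenA : Int := A.toList.length
  let lenB : Int := B.toList.length
  if lenB = 0 ∨ i < 0 ∨ lenA ≤ i then -1
  else
    let repeats : Int := PySem.Int.floordiv (i + lenB - 1) lenA + 1
    -- A * repeats (repeats > 0 here, so .toNat is exact)
    let rep : List Char := (List.replicate repeats.toNat A.toList).flatten
    if PySem.List.slice rep (some i) (some (i + lenB)) = B.toList then repeats else -1

-- ===== PRECONDITION & SPEC =====
-- Pre_ excludes negative i: for -len(A) ≤ i < 0 and B nonempty, A's value comes from Python's
-- accidental negative-index wraparound (B treats a negative offset as no match and returns -1),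
-- and for i < -len(A) with B nonempty A raises IndexError.
def Pre_search (A : String) (B : String) (i : Int) : Prop := 0 ≤ i
instance (A : String) (B : String) (i : Int) : Decidable (Pre_search A B i) := by unfold Pre_search; infer_instance
def pvWitness_search : String × String × Int := ("ab", "aba", 1)

def Spec_search (A : String) (B : String) (i : Int) (out : Int) : Prop := out = search_alt A B i
instance (A : String) (B : String) (i : Int) (out : Int) : Decidable (Spec_search A B i out) := by unfold Spec_search; infer_instance

-- ===== CLAIM (what is proved, stated in full; the proofs are below) =====
def Claim_equal_search : Prop := ∀ (A : String) (B : String) (i : Int), Dom_search A B i → Pre_search A B i → Spec_search A B i (search A B i)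

-- ===== LEMMAS AND PROOFS =====

-- indexing the flattening of n copies of xs is indexing xs modulo its length
theorem flatten_replicate_getElem? {α : Type} (xs : List α) :
    ∀ (n m : Nat), m < n * xs.length →
      ((List.replicate n xs).flatten)[m]? = xs[m % xs.length]? := by
  intro n
  induction n with
  | zero => intro m hm; omega
  | succ n ih =>
    intro m hm
    rw [Nat.succ_mul] at hm
    rw [List.replicate_succ, List.flatten_cons]
    by_cases h : m < xs.length
    · rw [List.getElem?_append, if_pos h, Nat.mod_eq_of_lt h]
    · rw [List.getElem?_append, if_neg h, ih (m - xs.length) (by omega)]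
      conv_rhs => rw [Nat.mod_eq_sub_mod (by omega)]

-- the remaining lenB - j characters of Bs match the infinite repetition of As read from offset a
abbrev QMatch {α : Type} [DecidableEq α] (As Bs : List α) (a j : Nat) : Prop :=
  ∀ k < Bs.length - j, As[(a + k) % As.length]? = Bs[j + k]?

theorem QMatch_step {α : Type} [DecidableEq α] (As Bs : List α) (a j : Nat) (hj : j < Bs.length)
    (h0 : As[a % As.length]? = Bs[j]?) :
    QMatch As Bs a j ↔ QMatch As Bs (a + 1) (j + 1) := by
  unfold QMatch
  constructor
  · intro H k hk
    have h1 : a + 1 + k = a + (k + 1) := by omega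
    have h2 : j + 1 + k = j + (k + 1) := by omega
    rw [h1, h2]
    exact H (k + 1) (by omega)
  · intro H k hk
    cases k with
    | zero => simpa using h0
    | succ k =>
      have h1 : a + (k + 1) = a + 1 + k := by omega
      have h2 : j + (k + 1) = j + 1 + k := by omega
      rw [h1, h2]
      exact H k (by omega)

theorem QMatch_len {α : Type} [DecidableEq α] (As Bs : List α) (j : Nat) :
    QMatch As Bs As.length j ↔ QMatch As Bs 0 j := by
  unfold QMatch
  simp [Nat.add_mod_left]

theorem fd_zero (i b : Int) (h0 : 0 ≤ i) (hb : i < b) : PySem.Int.floordiv i b = 0 := by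
  rw [PySem.Int.floordiv_eq_ediv_of_pos (by omega)]
  exact Int.ediv_eq_zero_of_lt h0 hb

theorem fd_shift (x b : Int) (hb : 0 < b) :
    PySem.Int.floordiv (b + x) b = 1 + PySem.Int.floordiv x b := by
  rw [PySem.Int.floordiv_eq_ediv_of_pos hb, PySem.Int.floordiv_eq_ediv_of_pos hb]
  have h1 : b + x = x + 1 * b := by ring
  rw [h1, Int.add_mul_ediv_right x 1 (by omega)]
  ring

-- loop invariant: searchLoop returns the final copy count iff the rest of Bs matches
theorem searchLoop_eq (As Bs : List Char) :
    ∀ (n : Nat) (repeats i j : Int), n = ((Bs.length : Int) - j).toNat →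
      0 ≤ i → i < (As.length : Int) → 0 ≤ j → j < (Bs.length : Int) →
      searchLoop As Bs (As.length : Int) (Bs.length : Int) repeats i j =
        if QMatch As Bs i.toNat j.toNat then
          repeats + PySem.Int.floordiv (i + ((Bs.length : Int) - j) - 1) (As.length : Int)
        else -1 := by
  intro n
  induction n with
  | zero => intro repeats i j hn _ _ _ hj; omega
  | succ n ih =>
    intro repeats i j hn hi0 hiA hj0 hjB
    have hA : (0:Int) < (As.length : Int) := by omega
    have hitn : i.toNat < As.length := by omega
    have hjtn : j.toNat < Bs.length := by omega
    have hgA : PySem.List.pyGet? As i = As[i.toNat]? := PySem.List.pyGet?_of_nonneg As hi0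
    have hgB : PySem.List.pyGet? Bs j = Bs[j.toNat]? := PySem.List.pyGet?_of_nonneg Bs hj0
    have hmod : i.toNat % As.length = i.toNat := Nat.mod_eq_of_lt hitn
    rw [searchLoop]
    by_cases hc : As[i.toNat]? = Bs[j.toNat]?
    · rw [dif_pos ⟨hiA, hjB, by rw [hgA, hgB, hc]⟩]
      have hstep := QMatch_step As Bs i.toNat j.toNat hjtn (by rw [hmod]; exact hc)
      by_cases hjend : j + 1 = (Bs.length : Int)
      · rw [if_pos hjend]
        have hq : QMatch As Bs i.toNat j.toNat := by
          intro k hk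
          have hk0 : k = 0 := by omega
          subst hk0
          simpa [hmod] using hc
        rw [if_pos hq]
        have harg : i + ((Bs.length : Int) - j) - 1 = i := by omega
        rw [harg, fd_zero i _ hi0 hiA]
        ring
      · rw [if_neg hjend]
        have hjB' : j + 1 < (Bs.length : Int) := by omega
        by_cases hiend : i + 1 = (As.length : Int)
        · rw [if_pos hiend,
              ih (repeats + 1) 0 (j + 1) (by omega) (by omega) (by omega) (by omega) hjB']
          have hlen : i.toNat + 1 = As.length := by omega
          have hQ : QMatch As Bs i.toNat j.toNat ↔ QMatch As Bs 0 (j.toNat + 1) := by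
            rw [hstep, hlen]; exact QMatch_len As Bs (j.toNat + 1)
          have hjt : ((j : Int) + 1).toNat = j.toNat + 1 := by omega
          have h0t : ((0 : Int)).toNat = (0 : Nat) := rfl
          have harg1 : (0 : Int) + ((Bs.length : Int) - (j + 1)) - 1
              = (Bs.length : Int) - j - 2 := by ring
          have harg2 : i + ((Bs.length : Int) - j) - 1
              = (As.length : Int) + ((Bs.length : Int) - j - 2) := by omega
          rw [hjt, h0t, harg1, harg2, fd_shift _ _ hA]
          by_cases hq : QMatch As Bs i.toNat j.toNat
          · rw [if_pos hq, if_pos (hQ.mp hq)]; ring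
          · rw [if_neg hq, if_neg (fun h => hq (hQ.mpr h))]
        · rw [if_neg hiend,
              ih repeats (i + 1) (j + 1) (by omega) (by omega) (by omega) (by omega) hjB']
          have hit : ((i : Int) + 1).toNat = i.toNat + 1 := by omega
          have hjt : ((j : Int) + 1).toNat = j.toNat + 1 := by omega
          have harg : i + 1 + ((Bs.length : Int) - (j + 1)) - 1
              = i + ((Bs.length : Int) - j) - 1 := by ring
          rw [hit, hjt, harg]
          by_cases hq : QMatch As Bs i.toNat j.toNat
          · rw [if_pos hq, if_pos (hstep.mp hq)]
          · rw [if_neg hq, if_neg (fun h => hq (hstep.mpr h))]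
    · rw [dif_neg (by
        intro hcontra
        exact hc (by rw [← hgA, ← hgB]; exact hcontra.2.2))]
      have hq : ¬ QMatch As Bs i.toNat j.toNat := by
        intro H
        exact hc (by have := H 0 (by omega); simpa [hmod] using this)
      rw [if_neg hq]

theorem search_main (A B : String) (i : Int) (hP : 0 ≤ i) :
    search A B i = search_alt A B i := by
  obtain ⟨a, rfl⟩ : ∃ a : Nat, i = (a : Int) := ⟨i.toNat, by omega⟩
  unfold search search_alt
  dsimp only
  by_cases hguard : ((B.toList.length : Int) = 0 ∨ (a : Int) < 0 ∨ (A.toList.length : Int) ≤ (a : Int))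
  · rw [if_pos hguard, searchLoop, dif_neg (by rintro ⟨h1, h2, -⟩; omega)]
  · rw [if_neg hguard]
    push Not at hguard
    obtain ⟨hB0, -, hiA⟩ := hguard
    have hA : (0 : Int) < (A.toList.length : Int) := by omega
    have hBpos : (0 : Int) < (B.toList.length : Int) := by omega
    rw [searchLoop_eq A.toList B.toList ((B.toList.length : Int) - 0).toNat 1 (a : Int) 0 rfl
        hP hiA le_rfl hBpos]
    set fd : Int := PySem.Int.floordiv ((a : Int) + (B.toList.length : Int) - 1)
        (A.toList.length : Int) with hfddef
    have harg : (a : Int) + ((B.toList.length : Int) - 0) - 1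
        = (a : Int) + (B.toList.length : Int) - 1 := by ring
    rw [harg]
    have hfd0 : 0 ≤ fd := by
      rw [hfddef, PySem.Int.floordiv_eq_ediv_of_pos hA]
      exact Int.ediv_nonneg (by omega) (by omega)
    have hbr := (PySem.Int.floordiv_eq_iff_of_pos hA).mp hfddef.symm
    have hcast : (((fd + 1).toNat * A.toList.length : Nat) : Int)
        = (fd + 1) * (A.toList.length : Int) := by
      push_cast [Int.toNat_of_nonneg (by omega : (0 : Int) ≤ fd + 1)]
      ring
    have hcap : a + B.toList.length ≤ (fd + 1).toNat * A.toList.length := by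
      have h2 := hbr.2
      omega
    set rep : List Char := (List.replicate (fd + 1).toNat A.toList).flatten with hrepdef
    have hreplen : rep.length = (fd + 1).toNat * A.toList.length := by
      rw [hrepdef]
      simp [List.length_flatten, List.map_replicate, List.sum_replicate, smul_eq_mul]
    rw [PySem.List.slice_natCast_add rep a B.toList.length]
    have hiff : ((rep.drop a).take B.toList.length = B.toList)
        ↔ QMatch A.toList B.toList a 0 := by
      constructor
      · intro he k hk
        have hgk := congrArg (fun l => l[k]?) he
        simp only at hgk
        rw [List.getElem?_take, if_pos (by omega), List.getElem?_drop,
            flatten_replicate_getElem? A.toList _ _ (by omega)] at hgk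
        simpa using hgk
      · intro hq
        apply List.ext_getElem?
        intro n
        by_cases hn : n < B.toList.length
        · rw [List.getElem?_take, if_pos hn, List.getElem?_drop,
              flatten_replicate_getElem? A.toList _ _ (by omega)]
          simpa using hq n (by omega)
        · rw [List.getElem?_take, if_neg hn,
              List.getElem?_eq_none (l := B.toList) (by omega)]
    have ht : ((a : Int)).toNat = a := Int.toNat_natCast a
    have hz : ((0 : Int)).toNat = (0 : Nat) := rfl
    by_cases hq : QMatch A.toList B.toList a 0
    · rw [if_pos (by rw [ht, hz]; exact hq), if_pos (hiff.mpr hq)]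
      ring
    · rw [if_neg (by rw [ht, hz]; exact hq), if_neg (fun h => hq (hiff.mp h))]

-- ===== VERDICT (by name: the statement is the Claim_ definition above) =====
theorem search_spec : Claim_equal_search := by
  intro A B i _ hP
  exact search_main A B i hP
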